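-- pv_equiv track=rewrite | github.com/Nathaliant/ProgMulti_ExPython | Aula12/Aula12.py | r_contem_parQ
-- ===== SOURCE A (Python) =====
-- def r_contem_parQ(w):
--     if len(w)==0:
--         return False
--     else:
--         a=w.pop()
--         if a%2==0:
--             return True
--         else:
--             return r_contem_parQ(w)
-- ===== SOURCE B (Python) =====
-- def r_contem_parQ(w):
--     while w:
--         a = w.pop()
--         if a % 2 == 0:
--             return True
--     return False
-- ===== Notes on version B (the rewrite author's own statement) =====
-- stated objective: simpler
-- what changed: Replaces the tail-recursion with an explicit while-loop that pops from the end of the list, keeping the same mutation of w.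
import Mathlib
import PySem

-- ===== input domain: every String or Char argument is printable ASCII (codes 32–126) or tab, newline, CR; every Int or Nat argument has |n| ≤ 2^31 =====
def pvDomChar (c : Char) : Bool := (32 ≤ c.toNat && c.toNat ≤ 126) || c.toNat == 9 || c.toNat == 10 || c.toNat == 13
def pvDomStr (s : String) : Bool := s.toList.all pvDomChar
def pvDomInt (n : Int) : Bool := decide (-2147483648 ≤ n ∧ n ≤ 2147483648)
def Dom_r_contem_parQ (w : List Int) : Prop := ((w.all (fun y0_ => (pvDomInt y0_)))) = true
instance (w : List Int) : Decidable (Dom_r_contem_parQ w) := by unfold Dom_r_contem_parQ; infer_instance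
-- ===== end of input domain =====

-- B replaces A's tail-recursion by an explicit while-loop popping from the end; B performs the
-- same in-place mutation of w as A; the equivalence proved here is about the RETURN value.

-- ===== PORT A =====
def r_contem_parQ (w : List Int) : Bool :=
  if w.length == 0 then false
  else
    match h : PySem.List.pop? w (-1) with
    | none => false
    | some (a, rest) =>
      if PySem.Int.mod a 2 == 0 then true
      else r_contem_parQ rest
termination_by w.length
decreasing_by
  have h2 : rest.length + 1 = w.length := PySem.List.length_of_pop?_eq_some w h
  omega

-- ===== PORT B =====
-- B's while-loop consumes w from the last element to the first; ported as a forward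
-- walk over w.reverse (the sequence of popped elements, in order).
def pvAltLoop : List Int → Bool
  | [] => false
  | a :: rest => if PySem.Int.mod a 2 == 0 then true else pvAltLoop rest

def r_contem_parQ_alt (w : List Int) : Bool := pvAltLoop w.reverse

-- ===== PRECONDITION & SPEC =====
def Spec_r_contem_parQ (w : List Int) (out : Bool) : Prop := out = r_contem_parQ_alt w
instance (w : List Int) (out : Bool) : Decidable (Spec_r_contem_parQ w out) := by unfold Spec_r_contem_parQ; infer_instance

-- ===== CLAIM (what is proved, stated in full; the proofs are below) =====
def Claim_equal_r_contem_parQ : Prop := ∀ (w : List Int), Dom_r_contem_parQ w → Spec_r_contem_parQ w (r_contem_parQ w)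

-- ===== LEMMAS AND PROOFS =====
theorem r_contem_parQ_eq_alt (w : List Int) : r_contem_parQ w = pvAltLoop w.reverse := by
  induction w using List.reverseRecOn with
  | nil => rw [r_contem_parQ, if_pos (by simp)]; rfl
  | append_singleton xs a ih =>
    have hpop : PySem.List.pop? (xs ++ [a]) (-1) = some (a, xs) := PySem.List.pop?_last xs a
    rw [r_contem_parQ, if_neg (by simp)]
    split
    · next heq => rw [hpop] at heq; exact absurd heq (by simp)
    · next a1 rest heq =>
      rw [hpop] at heq
      obtain ⟨rfl, rfl⟩ : a = a1 ∧ xs = rest := by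
        simpa using heq
      simp [List.reverse_append, pvAltLoop, ih]

-- ===== VERDICT (by name: the statement is the Claim_ definition above) =====
theorem r_contem_parQ_spec : Claim_equal_r_contem_parQ := by
  intro w _
  unfold Spec_r_contem_parQ r_contem_parQ_alt
  exact r_contem_parQ_eq_alt w
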